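-- pv_equiv track=rewrite | github.com/TheKrizzler/fstr | fstr.py | _splitWrites
-- ===== SOURCE A (Python) =====
-- def _splitWrites(tuples):
-- 	initialList = []
-- 	finalList = []
-- 	# Split in four
-- 	for entry in tuples:
-- 		for i in range(4):
-- 			initialList.append((entry[0]+(i*2),(entry[1] >> (16*i)) & 0xFFFF,2))
-- 	# Check for consecutive null-byte writes for optimization
-- 	for index in range(0,len(initialList)-1,2):
-- 		if initialList[index+1][0] - initialList[index][0] == 2 and initialList[index][1] + initialList[index+1][1] == 0:
-- 			finalList.append((initialList[index][0],initialList[index][1],4))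
-- 		else:
-- 			finalList.append((initialList[index][0],initialList[index][1],2))
-- 			finalList.append((initialList[index+1][0],initialList[index+1][1],2))
--
-- 	return sorted(finalList,key=lambda x: x[1])
-- ===== SOURCE B (Python) =====
-- def _splitWrites(tuples):
-- 	# Zero-valued writes are the minimal sort key (words are non-negative), so a stable
-- 	# sort puts them first in build order: bucket them out and sort only the non-zero writes.
-- 	zeros = []
-- 	others = []
-- 	for addr, value in tuples:
-- 		for half in range(2):
-- 			base = addr + 4 * half
-- 			lo = (value >> (32 * half)) & 0xFFFF
-- 			hi = (value >> (32 * half + 16)) & 0xFFFF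
-- 			if lo == 0 and hi == 0:
-- 				zeros.append((base, 0, 4))
-- 			else:
-- 				(zeros if lo == 0 else others).append((base, lo, 2))
-- 				(zeros if hi == 0 else others).append((base + 2, hi, 2))
-- 	return zeros + sorted(others, key=lambda x: x[1])
-- ===== Notes on version B (the rewrite author's own statement) =====
-- stated objective: alternative
-- what changed: B replaces A's build-then-full-stable-sort with a bucket partition: since every 16-bit word is non-negative, the stable sort puts all zero-valued writes first in build order, so B routes zero writes and non-zero writes into two separate buckets in one pass and only sorts the non-zero bucket.
import Mathlib
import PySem

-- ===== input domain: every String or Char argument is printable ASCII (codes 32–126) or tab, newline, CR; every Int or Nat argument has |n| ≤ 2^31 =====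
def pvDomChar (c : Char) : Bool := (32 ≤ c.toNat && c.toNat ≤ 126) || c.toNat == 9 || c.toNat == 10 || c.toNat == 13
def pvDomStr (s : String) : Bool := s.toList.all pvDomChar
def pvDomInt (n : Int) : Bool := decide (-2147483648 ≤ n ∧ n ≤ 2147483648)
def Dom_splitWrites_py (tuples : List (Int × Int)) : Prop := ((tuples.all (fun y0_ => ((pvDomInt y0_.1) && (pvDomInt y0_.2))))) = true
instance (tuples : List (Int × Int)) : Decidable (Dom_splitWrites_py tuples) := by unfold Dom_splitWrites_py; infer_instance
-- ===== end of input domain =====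

-- B buckets zero-valued writes apart from non-zero ones in one pass and sorts only the
-- non-zero bucket (words are non-negative, so the stable sort puts zero writes first in
-- build order); objective: alternative.

-- ===== PORT A =====
-- first loop: initialList.append((entry[0]+i*2, (entry[1] >> (16*i)) & 0xFFFF, 2)) for i in range(4)
-- ((16*i).toNat is exact here: i ranges over range(4), so 16*i ≥ 0)
def pvInitialList (tuples : List (Int × Int)) : List (Int × Int × Int) :=
  tuples.foldl (fun acc (entry : Int × Int) =>
    (PySem.List.pyRange 0 4 1).foldl (fun acc2 (i : Int) =>
      acc2 ++ [(entry.1 + i * 2, PySem.Int.band (entry.2 >>> (16 * i).toNat) 0xFFFF, (2 : Int))]) acc) []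

-- second loop: for index in range(0, len(initialList)-1, 2): merge or keep the pair
def pvFinalList (initialList : List (Int × Int × Int)) : List (Int × Int × Int) :=
  (PySem.List.pyRange 0 (PySem.List.len initialList - 1) 2).foldl (fun acc index =>
    if (PySem.List.pyGetD initialList (index + 1) (0, 0, 0)).1
         - (PySem.List.pyGetD initialList index (0, 0, 0)).1 = 2
       ∧ (PySem.List.pyGetD initialList index (0, 0, 0)).2.1
         + (PySem.List.pyGetD initialList (index + 1) (0, 0, 0)).2.1 = 0 then
      acc ++ [((PySem.List.pyGetD initialList index (0, 0, 0)).1,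
               (PySem.List.pyGetD initialList index (0, 0, 0)).2.1, (4 : Int))]
    else
      acc ++ [((PySem.List.pyGetD initialList index (0, 0, 0)).1,
               (PySem.List.pyGetD initialList index (0, 0, 0)).2.1, (2 : Int)),
              ((PySem.List.pyGetD initialList (index + 1) (0, 0, 0)).1,
               (PySem.List.pyGetD initialList (index + 1) (0, 0, 0)).2.1, (2 : Int))]) []

def splitWrites_py (tuples : List (Int × Int)) : List (Int × Int × Int) :=
  PySem.List.sorted (pvFinalList (pvInitialList tuples)) (fun x => x.2.1) false

-- ===== PORT B =====
-- state = (zeros, others); per entry, for half in range(2) route each 16-bit word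
-- ((32*half).toNat and (32*half+16).toNat are exact: half ∈ {0,1})
def pvBucketStep (st : List (Int × Int × Int) × List (Int × Int × Int)) (e : Int × Int) :
    List (Int × Int × Int) × List (Int × Int × Int) :=
  (PySem.List.pyRange 0 2 1).foldl (fun st half =>
    let base := e.1 + 4 * half
    let lo := PySem.Int.band (e.2 >>> (32 * half).toNat) 0xFFFF
    let hi := PySem.Int.band (e.2 >>> (32 * half + 16).toNat) 0xFFFF
    if lo = 0 ∧ hi = 0 then (st.1 ++ [(base, 0, 4)], st.2)
    else
      let st1 := if lo = 0 then (st.1 ++ [(base, lo, 2)], st.2) else (st.1, st.2 ++ [(base, lo, 2)])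
      if hi = 0 then (st1.1 ++ [(base + 2, hi, 2)], st1.2) else (st1.1, st1.2 ++ [(base + 2, hi, 2)])) st

def splitWrites_py_alt (tuples : List (Int × Int)) : List (Int × Int × Int) :=
  let st := tuples.foldl pvBucketStep ([], [])
  st.1 ++ PySem.List.sorted st.2 (fun x => x.2.1) false

-- ===== PRECONDITION & SPEC =====
def Spec_splitWrites_py (tuples : List (Int × Int)) (out : List (Int × Int × Int)) : Prop := out = splitWrites_py_alt tuples
instance (tuples : List (Int × Int)) (out : List (Int × Int × Int)) : Decidable (Spec_splitWrites_py tuples out) := by unfold Spec_splitWrites_py; infer_instance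

-- ===== CLAIM (what is proved, stated in full; the proofs are below) =====
def Claim_equal_splitWrites_py : Prop := ∀ (tuples : List (Int × Int)), Dom_splitWrites_py tuples → Spec_splitWrites_py tuples (splitWrites_py tuples)

-- ===== LEMMAS AND PROOFS =====

def pvWord (v : Int) (i : Nat) : Int := PySem.Int.band (v >>> (16 * i)) 0xFFFF

def pvPairWrites (base lo hi : Int) : List (Int × Int × Int) :=
  if lo = 0 ∧ hi = 0 then [(base, 0, 4)] else [(base, lo, 2), (base + 2, hi, 2)]

-- the write stream both programs generate, entry by entry
def pvWrites (e : Int × Int) : List (Int × Int × Int) :=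
  pvPairWrites e.1 (pvWord e.2 0) (pvWord e.2 1) ++ pvPairWrites (e.1 + 4) (pvWord e.2 2) (pvWord e.2 3)

-- the four 16-bit words A appends for one entry
def pvWlist (e : Int × Int) : List (Int × Int × Int) :=
  [(e.1, pvWord e.2 0, 2), (e.1 + 2, pvWord e.2 1, 2),
   (e.1 + 4, pvWord e.2 2, 2), (e.1 + 6, pvWord e.2 3, 2)]

-- structural form of A's index-pair scan
def pvScan2 : List (Int × Int × Int) → List (Int × Int × Int)
  | x :: y :: rest =>
      (if y.1 - x.1 = 2 ∧ x.2.1 + y.2.1 = 0 then [(x.1, x.2.1, (4 : Int))]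
       else [(x.1, x.2.1, (2 : Int)), (y.1, y.2.1, (2 : Int))]) ++ pvScan2 rest
  | _ => []

theorem pvWord_nonneg (v : Int) (i : Nat) : 0 ≤ pvWord v i := by
  unfold pvWord
  rw [PySem.Int.band_comm]
  exact PySem.Int.band_nonneg_of_nonneg_left _ (by norm_num)

theorem pyRange_two_cons (a b : Int) (h : a < b) :
    PySem.List.pyRange a b 2 = a :: PySem.List.pyRange (a + 2) b 2 := by
  rw [PySem.List.pyRange_of_pos _ _ (by norm_num : (0:Int) < 2),
      PySem.List.pyRange_of_pos _ _ (by norm_num : (0:Int) < 2)]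
  have h1 : ((b - a + 2 - 1) / 2).toNat
      = (if a + 2 < b then ((b - (a + 2) + 2 - 1) / 2).toNat else 0) + 1 := by
    split_ifs <;> omega
  rw [if_pos h, h1, List.range_succ_eq_map]
  simp only [List.map_cons, List.map_map]
  have hf : ((fun k : Nat => a + 2 * (k : Int)) ∘ Nat.succ)
      = fun k : Nat => (a + 2) + 2 * (k : Int) := by
    funext k; simp [Nat.succ_eq_add_one]; ring
  rw [hf]
  norm_num

theorem pyRange_two_nil (a b : Int) (h : b ≤ a) : PySem.List.pyRange a b 2 = [] := by
  rw [PySem.List.pyRange_of_pos _ _ (by norm_num : (0:Int) < 2)]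
  rw [if_neg (by omega)]
  simp

-- A's index-pair scan over the suffix M of L (scanned indices start at |P|) is pvScan2 M
theorem pvScan2_aux (L : List (Int × Int × Int)) :
    ∀ (n : Nat) (M P acc : List (Int × Int × Int)),
      M.length = n → L = P ++ M → n % 2 = 0 →
      (PySem.List.pyRange (P.length : Int) (PySem.List.len L - 1) 2).foldl (fun acc index =>
        if (PySem.List.pyGetD L (index + 1) (0, 0, 0)).1
             - (PySem.List.pyGetD L index (0, 0, 0)).1 = 2
           ∧ (PySem.List.pyGetD L index (0, 0, 0)).2.1
             + (PySem.List.pyGetD L (index + 1) (0, 0, 0)).2.1 = 0 then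
          acc ++ [((PySem.List.pyGetD L index (0, 0, 0)).1,
                   (PySem.List.pyGetD L index (0, 0, 0)).2.1, (4 : Int))]
        else
          acc ++ [((PySem.List.pyGetD L index (0, 0, 0)).1,
                   (PySem.List.pyGetD L index (0, 0, 0)).2.1, (2 : Int)),
                  ((PySem.List.pyGetD L (index + 1) (0, 0, 0)).1,
                   (PySem.List.pyGetD L (index + 1) (0, 0, 0)).2.1, (2 : Int))]) acc
      = acc ++ pvScan2 M := by
  intro n
  induction n using Nat.strong_induction_on with
  | _ n ih =>
    intro M P acc hlen hL hpar
    cases M with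
    | nil =>
      have hlenL : PySem.List.len L = (P.length : Int) := by
        simp [PySem.List.len_eq, hL]
      rw [hlenL, pyRange_two_nil _ _ (by omega)]
      simp [pvScan2]
    | cons x M' =>
      cases M' with
      | nil => exfalso; simp at hlen; omega
      | cons y rest =>
        simp only [List.length_cons] at hlen
        have hlenL : PySem.List.len L = (P.length : Int) + (rest.length : Int) + 2 := by
          simp [PySem.List.len_eq, hL]; ring
        have hx : PySem.List.pyGetD L ((P.length : Int)) (0, 0, 0) = x := by
          rw [show ((P.length : Int)) = ((P.length : Nat) : Int) from rfl,
              PySem.List.pyGetD_natCast, hL, List.getD_eq_getElem?_getD,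
              List.getElem?_append_right (Nat.le_refl _)]
          simp
        have hy : PySem.List.pyGetD L ((P.length : Int) + 1) (0, 0, 0) = y := by
          rw [show ((P.length : Int) + 1) = ((P.length + 1 : Nat) : Int) by simp,
              PySem.List.pyGetD_natCast, hL, List.getD_eq_getElem?_getD,
              List.getElem?_append_right (by omega)]
          simp
        rw [pyRange_two_cons _ _ (by rw [hlenL]; omega), List.foldl_cons,
            show ((P.length : Nat) : Int) + 2 = (((P ++ [x, y]).length : Nat) : Int) by
              simp]
        refine (ih rest.length (by omega) rest (P ++ [x, y]) _ rfl (by simp [hL]) (by omega)).trans ?_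
        simp only [hx, hy, pvScan2]
        split_ifs <;> simp

-- specialisation to the whole list (what pvFinalList computes)
theorem pvFinalList_eq_scan2 (L : List (Int × Int × Int)) (hpar : L.length % 2 = 0) :
    pvFinalList L = pvScan2 L := by
  have h := pvScan2_aux L L.length L [] [] rfl (by simp) hpar
  simpa [pvFinalList] using h

theorem pvWlist_len_par (tuples : List (Int × Int)) :
    (tuples.flatMap pvWlist).length % 2 = 0 := by
  induction tuples with
  | nil => simp
  | cons e rest ih => simp [pvWlist] at ih ⊢; omega

theorem pvScan2_flatMap (tuples : List (Int × Int)) :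
    pvScan2 (tuples.flatMap pvWlist) = tuples.flatMap pvWrites := by
  induction tuples with
  | nil => simp [pvScan2]
  | cons e rest ih =>
    rw [List.flatMap_cons, List.flatMap_cons]
    show pvScan2 ((e.1, pvWord e.2 0, 2) :: (e.1 + 2, pvWord e.2 1, 2) ::
        ((e.1 + 4, pvWord e.2 2, 2) :: (e.1 + 6, pvWord e.2 3, 2) :: rest.flatMap pvWlist)) = _
    simp only [pvScan2]
    rw [ih]
    have h01 : 0 ≤ pvWord e.2 0 := pvWord_nonneg _ _
    have h11 : 0 ≤ pvWord e.2 1 := pvWord_nonneg _ _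
    have h21 : 0 ≤ pvWord e.2 2 := pvWord_nonneg _ _
    have h31 : 0 ≤ pvWord e.2 3 := pvWord_nonneg _ _
    have c1 : (e.1 + 2 - e.1 = 2 ∧ pvWord e.2 0 + pvWord e.2 1 = 0)
        ↔ (pvWord e.2 0 = 0 ∧ pvWord e.2 1 = 0) := by
      constructor <;> intro h <;> constructor <;> omega
    have c2 : (e.1 + 6 - (e.1 + 4) = 2 ∧ pvWord e.2 2 + pvWord e.2 3 = 0)
        ↔ (pvWord e.2 2 = 0 ∧ pvWord e.2 3 = 0) := by
      constructor <;> intro h <;> constructor <;> omega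
    simp only [pvWrites, pvPairWrites, c1, c2]
    split_ifs with h1 h2 h2
    · simp [h1.1, h2.1]
    · simp [h1.1]; omega
    · simp [h2.1]
    · simp; omega

theorem pvInitialList_eq (tuples : List (Int × Int)) :
    pvInitialList tuples = tuples.flatMap pvWlist := by
  have hr : PySem.List.pyRange 0 4 1 = [0, 1, 2, 3] := by decide
  have hbody : (fun (acc : List (Int × Int × Int)) (entry : Int × Int) =>
      (PySem.List.pyRange 0 4 1).foldl (fun acc2 (i : Int) =>
        acc2 ++ [(entry.1 + i * 2, PySem.Int.band (entry.2 >>> (16 * i).toNat) 0xFFFF, (2 : Int))]) acc)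
      = fun acc entry => acc ++ pvWlist entry := by
    funext acc entry
    rw [hr]
    simp [List.foldl, pvWlist, pvWord]
  unfold pvInitialList
  rw [hbody, PySem.List.foldl_append_eq_flatMap]
  simp

-- ----- B side: the bucket fold computes the (zero, non-zero) partition of the stream -----

def pvKey0 (x : Int × Int × Int) : Bool := decide (x.2.1 = 0)

theorem pvHalfStep (st : List (Int × Int × Int) × List (Int × Int × Int)) (base lo hi : Int) :
    (if lo = 0 ∧ hi = 0 then (st.1 ++ [(base, 0, 4)], st.2)
     else
       let st1 := if lo = 0 then (st.1 ++ [(base, lo, 2)], st.2) else (st.1, st.2 ++ [(base, lo, 2)])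
       if hi = 0 then (st1.1 ++ [(base + 2, hi, 2)], st1.2) else (st1.1, st1.2 ++ [(base + 2, hi, 2)]))
      = (st.1 ++ (pvPairWrites base lo hi).filter pvKey0,
         st.2 ++ (pvPairWrites base lo hi).filter (fun x => !pvKey0 x)) := by
  by_cases h0 : lo = 0 <;> by_cases h1 : hi = 0 <;>
    simp [pvPairWrites, pvKey0, List.filter, h0, h1]

theorem pvBucketStep_eq (st : List (Int × Int × Int) × List (Int × Int × Int)) (e : Int × Int) :
    pvBucketStep st e
      = (st.1 ++ (pvWrites e).filter pvKey0, st.2 ++ (pvWrites e).filter (fun x => !pvKey0 x)) := by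
  have hr : PySem.List.pyRange 0 2 1 = [0, 1] := by decide
  unfold pvBucketStep
  rw [hr]
  have e0 : (32 * (0:Int)).toNat = 16 * 0 := by decide
  have e1 : ((32 * (0:Int) + 16)).toNat = 16 * 1 := by decide
  have e2 : (32 * (1:Int)).toNat = 16 * 2 := by decide
  have e3 : ((32 * (1:Int) + 16)).toNat = 16 * 3 := by decide
  simp only [List.foldl_cons, List.foldl_nil, e0, e1, e2, e3]
  rw [pvHalfStep, pvHalfStep]
  simp [pvWrites, pvWord, List.filter_append]

theorem pvBucketFold_eq (tuples : List (Int × Int)) :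
    ∀ st : List (Int × Int × Int) × List (Int × Int × Int),
      tuples.foldl pvBucketStep st
        = (st.1 ++ (tuples.flatMap pvWrites).filter pvKey0,
           st.2 ++ (tuples.flatMap pvWrites).filter (fun x => !pvKey0 x)) := by
  induction tuples with
  | nil => intro st; simp
  | cons e rest ih =>
    intro st
    rw [List.foldl_cons, pvBucketStep_eq, ih]
    simp [List.filter_append]

-- ----- stable-sort partition: zero-key elements come first, in order -----

theorem pvInsertBy_skip {α : Type} (before : α → α → Bool) (x : α) :
    ∀ (zs ns : List α), (∀ z ∈ zs, before x z = false) →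
      PySem.List.insertBy before x (zs ++ ns) = zs ++ PySem.List.insertBy before x ns := by
  intro zs
  induction zs with
  | nil => intro ns _; simp
  | cons z zs' ih =>
    intro ns h
    rw [List.cons_append]
    show PySem.List.insertBy before x (z :: (zs' ++ ns)) = _
    simp only [PySem.List.insertBy, h z (by simp)]
    rw [ih ns (fun z hz => h z (by simp [hz]))]
    simp

theorem pvMem_insertBy {α : Type} (before : α → α → Bool) (x : α) :
    ∀ (l : List α) (y : α), y ∈ PySem.List.insertBy before x l → y = x ∨ y ∈ l := by
  intro l
  induction l with
  | nil => intro y hy; simp [PySem.List.insertBy] at hy; exact Or.inl hy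
  | cons a l' ih =>
    intro y hy
    simp only [PySem.List.insertBy] at hy
    by_cases hb : before x a = true
    · rw [if_pos hb] at hy
      rcases List.mem_cons.mp hy with h | h
      · exact Or.inl h
      · exact Or.inr h
    · rw [if_neg hb] at hy
      rcases List.mem_cons.mp hy with h | h
      · exact Or.inr (by simp [h])
      · rcases ih y h with h' | h'
        · exact Or.inl h'
        · exact Or.inr (by simp [h'])

-- the insertion-sort fold over zs ++ ns, zs all key 0, ns all key > 0
theorem pvSortFold_split (key : Int × Int × Int → Int) :
    ∀ (L zs ns : List (Int × Int × Int)),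
      (∀ z ∈ zs, key z = 0) → (∀ n ∈ ns, 0 < key n) → (∀ x ∈ L, 0 ≤ key x) →
      L.foldl (fun acc x => PySem.List.insertBy (fun a b => decide (key a < key b)) x acc) (zs ++ ns)
        = (zs ++ L.filter (fun x => decide (key x = 0)))
          ++ (L.filter (fun x => !decide (key x = 0))).foldl
               (fun acc x => PySem.List.insertBy (fun a b => decide (key a < key b)) x acc) ns := by
  intro L
  induction L with
  | nil => intro zs ns _ _ _; simp
  | cons x L' ih =>
    intro zs ns hzs hns hL
    have hx : 0 ≤ key x := hL x (by simp)
    rw [List.foldl_cons]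
    by_cases h0 : key x = 0
    · have hskip : ∀ z ∈ zs, (decide (key x < key z)) = false := by
        intro z hz; simp [hzs z hz, h0]
      rw [pvInsertBy_skip _ _ zs ns hskip]
      have hins : PySem.List.insertBy (fun a b => decide (key a < key b)) x ns = x :: ns := by
        cases ns with
        | nil => simp [PySem.List.insertBy]
        | cons n ns' =>
          simp only [PySem.List.insertBy]
          rw [if_pos (by simp [h0]; exact hns n (by simp))]
      rw [hins, show zs ++ x :: ns = (zs ++ [x]) ++ ns by simp]
      have hzs' : ∀ z ∈ zs ++ [x], key z = 0 := by
        intro z hz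
        rcases List.mem_append.mp hz with h | h
        · exact hzs z h
        · simp at h; rw [h]; exact h0
      rw [ih (zs ++ [x]) ns hzs' hns (fun y hy => hL y (List.mem_cons_of_mem _ hy))]
      simp [h0]
    · have hpos : 0 < key x := lt_of_le_of_ne hx (Ne.symm h0)
      have hskip : ∀ z ∈ zs, (decide (key x < key z)) = false := by
        intro z hz; simp [hzs z hz]; omega
      rw [pvInsertBy_skip _ _ zs ns hskip]
      have hns' : ∀ n ∈ PySem.List.insertBy (fun a b => decide (key a < key b)) x ns, 0 < key n := by
        intro n hn
        rcases pvMem_insertBy _ _ ns n hn with h | h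
        · rw [h]; exact hpos
        · exact hns n h
      rw [ih zs (PySem.List.insertBy (fun a b => decide (key a < key b)) x ns) hzs hns'
            (fun y hy => hL y (List.mem_cons_of_mem _ hy))]
      simp [h0]

theorem pvSorted_split (L : List (Int × Int × Int)) (h : ∀ x ∈ L, 0 ≤ x.2.1) :
    PySem.List.sorted L (fun x => x.2.1) false
      = L.filter pvKey0
        ++ PySem.List.sorted (L.filter (fun x => !pvKey0 x)) (fun x => x.2.1) false := by
  have h1 := pvSortFold_split (fun x => x.2.1) L [] [] (by simp) (by simp) h
  simpa [PySem.List.sorted, pvKey0] using h1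

theorem pvStream_nonneg (tuples : List (Int × Int)) :
    ∀ x ∈ tuples.flatMap pvWrites, 0 ≤ x.2.1 := by
  intro x hx
  rcases List.mem_flatMap.mp hx with ⟨e, _, hxe⟩
  have hpair : ∀ base lo hi : Int, 0 ≤ lo → 0 ≤ hi →
      ∀ y ∈ pvPairWrites base lo hi, 0 ≤ y.2.1 := by
    intro base lo hi hlo hhi y hy
    unfold pvPairWrites at hy
    split_ifs at hy
    · simp at hy; simp [hy]
    · rcases List.mem_cons.mp hy with h | h
      · simp [h, hlo]
      · simp at h; simp [h, hhi]
  unfold pvWrites at hxe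
  rcases List.mem_append.mp hxe with h | h
  · exact hpair _ _ _ (pvWord_nonneg e.2 0) (pvWord_nonneg e.2 1) x h
  · exact hpair _ _ _ (pvWord_nonneg e.2 2) (pvWord_nonneg e.2 3) x h

-- ===== VERDICT (by name: the statement is the Claim_ definition above) =====
theorem splitWrites_py_spec : Claim_equal_splitWrites_py := by
  unfold Claim_equal_splitWrites_py
  intro tuples _
  unfold Spec_splitWrites_py splitWrites_py splitWrites_py_alt
  rw [pvInitialList_eq,
      pvFinalList_eq_scan2 _ (pvWlist_len_par tuples),
      pvScan2_flatMap,
      pvBucketFold_eq tuples ([], []),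
      pvSorted_split _ (pvStream_nonneg tuples)]
  simp
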